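-- pv_equiv track=rewrite | github.com/zheladev/python-hackerrank | built-ins/ginortS.py | ginorts
-- ===== SOURCE A (Python) =====
-- def get_char_custom_type(char):
--     # type 3 = even number, type 2 = odd number, type 1 = uppercase, type 0 = lowercase
--     ord_char = ord(char)
--     lc_a_int_value, lc_z_int_value = ord('a'), ord('z')
--     uc_A_int_value, uc_Z_int_value = ord('A'), ord('Z')
--     if ord_char >= lc_a_int_value and ord_char <= lc_z_int_value:
--         return 0
--     elif ord_char >= uc_A_int_value and ord_char <= uc_Z_int_value:
--         return 1
--     else:
--         # odd -> 2; even -> 3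
--         return 3 if int(chr(ord_char)) % 2 == 0 else 2
--
-- def merge_substrings(sub1, sub2):
--     new_list = []
--     while (len(sub1) > 0 and len(sub2) > 0):
--         if is_higher(sub1[0], sub2[0]):
--             new_list.append(sub1[0])
--             sub1 = sub1[1:]
--         else:
--             new_list.append(sub2[0])
--             sub2 = sub2[1:]
--     for char in sub1:
--         new_list.append(char)
--     for char in sub2:
--         new_list.append(char)
--     return "".join(new_list)
--
-- def is_higher(comp1, comp2):
--     type1, type2 = get_char_custom_type(comp1), get_char_custom_type(comp2)
--     if type1 != type2:
--         return type1 < type2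
--     else:
--         return ord(comp1) < ord(comp2)
--
-- def ginorts(to_sort):
--     sorted_str = to_sort
--     if len(to_sort) == 2:
--         # flip
--         sorted_str = to_sort if is_higher(
--             to_sort[0], to_sort[1]) else to_sort[::-1]
--     if len(to_sort) < 2:
--         # already sorted since there's only 1 / 0 elements
--         pass
--     else:
--         # recursively call ginorts on both subsequences
--         substr1 = ginorts(to_sort[:len(to_sort)//2])
--         substr2 = ginorts(to_sort[len(to_sort)//2:])
--         sorted_str = merge_substrings(substr1, substr2)
--     return sorted_str
-- ===== SOURCE B (Python) =====
-- def ginorts(to_sort):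
--     # strings of length < 2 are returned unchanged (A does the same)
--     if len(to_sort) < 2:
--         return to_sort
--     # counting sort: one classification/counting pass, then emit in final key order
--     counts = {}
--     for char in to_sort:
--         counts[char] = counts.get(char, 0) + 1
--     order = ("abcdefghijklmnopqrstuvwxyz"
--              "ABCDEFGHIJKLMNOPQRSTUVWXYZ"
--              "13579" "02468")
--     return "".join(char * counts.get(char, 0) for char in order)
-- ===== Notes on version B (the rewrite author's own statement) =====
-- stated objective: faster
-- what changed: Replaces A's recursive merge sort (with a quadratic slicing merge) by a counting sort: one pass builds a character-count dict, then one emit pass over the fixed final key order (a-z, A-Z, odd digits, even digits) joins each character repeated by its count.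
-- outside the precondition, e.g. on ginorts('ab '): A raises ValueError, B returns 'ab'
import Mathlib
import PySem

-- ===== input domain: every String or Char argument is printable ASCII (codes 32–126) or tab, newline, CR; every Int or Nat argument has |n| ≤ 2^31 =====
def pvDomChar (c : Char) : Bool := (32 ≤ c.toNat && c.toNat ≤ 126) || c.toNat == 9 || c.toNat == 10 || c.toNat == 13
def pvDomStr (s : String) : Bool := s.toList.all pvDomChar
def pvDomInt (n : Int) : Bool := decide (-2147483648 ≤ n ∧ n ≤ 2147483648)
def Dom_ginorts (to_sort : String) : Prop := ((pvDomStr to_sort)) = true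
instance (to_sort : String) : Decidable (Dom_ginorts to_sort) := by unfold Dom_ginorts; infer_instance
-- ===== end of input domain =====

-- B replaces A's hand-written recursive merge sort by a counting sort: one counting
-- pass plus one emit pass over the fixed key order (objective: faster).

-- ===== PORT A =====
-- get_char_custom_type: returns none exactly where int(chr(ord_char)) raises ValueError
def getCharCustomType (char : Char) : Option Int :=
  if 97 ≤ char.toNat ∧ char.toNat ≤ 122 then some 0
  else if 65 ≤ char.toNat ∧ char.toNat ≤ 90 then some 1
  else
    match PySem.Int.ofChars? [char] with
    | none => none
    | some n => some (if PySem.Int.mod n 2 = 0 then 3 else 2)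

-- is_higher (propagates the ValueError of get_char_custom_type)
def isHigher (comp1 comp2 : Char) : Option Bool :=
  match getCharCustomType comp1, getCharCustomType comp2 with
  | some type1, some type2 =>
      some (if type1 ≠ type2 then decide (type1 < type2) else decide (comp1.toNat < comp2.toNat))
  | _, _ => none

-- merge_substrings: the while loop with the new_list accumulator; the two trailing
-- for loops are the final `acc ++ s1 ++ s2`
def mergeSubstrings (acc sub1 sub2 : List Char) : Option (List Char) :=
  match sub1, sub2 with
  | c1 :: t1, c2 :: t2 =>
      match isHigher c1 c2 with
      | none => none
      | some true => mergeSubstrings (acc ++ [c1]) t1 (c2 :: t2)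
      | some false => mergeSubstrings (acc ++ [c2]) (c1 :: t1) t2
  | s1, s2 => some (acc ++ s1 ++ s2)
termination_by sub1.length + sub2.length

-- ginorts on the character list; `to_sort[:k]`/`to_sort[k:]` with 0 ≤ k = n//2 ≤ n are
-- take/drop.  The len == 2 branch computes is_higher(to_sort[0], to_sort[1]) into
-- sorted_str, which is then overwritten by the merge; only its possible ValueError
-- (the Option bind) is observable, so the computed Bool is discarded.
def ginortsAux (l : List Char) : Option (List Char) :=
  if l.length < 2 then some l
  else
    let flip : Option Bool :=
      if l.length = 2 then
        match PySem.List.pyGet? l 0, PySem.List.pyGet? l 1 with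
        | some c0, some c1 => isHigher c0 c1
        | _, _ => none
      else some true
    match flip with
    | none => none
    | some _ =>
        match ginortsAux (l.take (l.length / 2)), ginortsAux (l.drop (l.length / 2)) with
        | some s1, some s2 => mergeSubstrings [] s1 s2
        | _, _ => none
termination_by l.length
decreasing_by all_goals simp [List.length_take, List.length_drop]; omega

-- A raises ValueError exactly where ginortsAux is none; those inputs are outside Pre_
def ginorts (to_sort : String) : String :=
  match ginortsAux to_sort.toList with
  | some l => String.ofList l
  | none => ""

-- ===== PORT B =====
-- the Python string literal "abcdefghijklmnopqrstuvwxyzABCDEFGHIJKLMNOPQRSTUVWXYZ1357902468",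
-- iterated character by character, as the list of its characters
def pyOrderChars : List Char :=
  ['a', 'b', 'c', 'd', 'e', 'f', 'g', 'h', 'i', 'j', 'k', 'l', 'm', 'n', 'o', 'p', 'q', 'r', 's', 't', 'u', 'v', 'w', 'x', 'y', 'z', 'A', 'B', 'C', 'D', 'E', 'F', 'G', 'H', 'I', 'J', 'K', 'L', 'M', 'N', 'O', 'P', 'Q', 'R', 'S', 'T', 'U', 'V', 'W', 'X', 'Y', 'Z', '1', '3', '5', '7', '9', '0', '2', '4', '6', '8']

def ginorts_alt (to_sort : String) : String :=
  let l := to_sort.toList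
  if l.length < 2 then to_sort
  else
    let counts := l.foldl (fun d c => d.insert c (d.getD c 0 + 1))
      (PySem.Dict.empty : PySem.Dict Char Int)
    String.ofList (pyOrderChars.flatMap (fun c => List.replicate (counts.getD c 0).toNat c))

-- ===== PRECONDITION & SPEC =====
def isAlnumChar (c : Char) : Bool :=
  (97 ≤ c.toNat && c.toNat ≤ 122) || (65 ≤ c.toNat && c.toNat ≤ 90) ||
  (48 ≤ c.toNat && c.toNat ≤ 57)

-- A raises ValueError on strings of length ≥ 2 containing a character that is not an
-- ASCII letter or digit (int(char) fails); strings of length < 2 are returned as-is.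
def Pre_ginorts (to_sort : String) : Prop :=
  to_sort.toList.length < 2 ∨ to_sort.toList.all isAlnumChar = true
instance (to_sort : String) : Decidable (Pre_ginorts to_sort) := by
  unfold Pre_ginorts; infer_instance

def pvWitness_ginorts : String := "Sorting1234"

def Spec_ginorts (to_sort : String) (out : String) : Prop := out = ginorts_alt to_sort
instance (to_sort : String) (out : String) : Decidable (Spec_ginorts to_sort out) := by
  unfold Spec_ginorts; infer_instance

-- ===== CLAIM =====
def Claim_equal_ginorts : Prop :=
  ∀ (to_sort : String), Dom_ginorts to_sort → Pre_ginorts to_sort →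
    Spec_ginorts to_sort (ginorts to_sort)

-- ===== LEMMAS AND PROOFS =====

-- The comparator of A is the strict order of the key (type, ord); both programs
-- produce the unique permutation of the input sorted by that key.
def typeOf (c : Char) : Int :=
  if 97 ≤ c.toNat ∧ c.toNat ≤ 122 then 0
  else if 65 ≤ c.toNat ∧ c.toNat ≤ 90 then 1
  else if (c.toNat - 48) % 2 = 0 then 3 else 2

def ckey (c : Char) : Int := typeOf c * 128 + c.toNat

def cle (a b : Char) : Prop := ckey a < ckey b ∨ a = b

lemma cle_trans {a b c : Char} (h1 : cle a b) (h2 : cle b c) : cle a c := by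
  rcases h1 with h1 | rfl
  · rcases h2 with h2 | rfl
    · exact Or.inl (lt_trans h1 h2)
    · exact Or.inl h1
  · exact h2

lemma cle_antisymm {a b : Char} (h1 : cle a b) (h2 : cle b a) : a = b := by
  rcases h1 with h1 | rfl
  · rcases h2 with h2 | rfl
    · exact absurd h2 (lt_asymm h1)
    · rfl
  · rfl

lemma typeOf_bounds (c : Char) : 0 ≤ typeOf c ∧ typeOf c ≤ 3 := by
  unfold typeOf; split_ifs <;> omega

lemma alnum_toNat_lt (c : Char) (h : isAlnumChar c = true) : c.toNat < 128 := by
  simp only [isAlnumChar, Bool.or_eq_true, Bool.and_eq_true, decide_eq_true_eq] at h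
  omega

-- enumeration of the 62 alphanumeric characters
set_option maxHeartbeats 1000000 in
lemma alnum_facts (c : Char) (h : isAlnumChar c = true) :
    c ∈ pyOrderChars ∧ getCharCustomType c = some (typeOf c) := by
  have hb : 48 ≤ c.toNat ∧ c.toNat ≤ 122 := by
    simp only [isAlnumChar, Bool.or_eq_true, Bool.and_eq_true, decide_eq_true_eq] at h
    omega
  have hc : Char.ofNat c.toNat = c := Char.ofNat_toNat c
  set n := c.toNat with hn
  obtain ⟨h1, h2⟩ := hb
  clear_value n
  subst hc
  interval_cases n <;> first | (exact absurd h (by decide)) | decide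

lemma ckey_inj {a b : Char} (ha : isAlnumChar a = true) (hb : isAlnumChar b = true)
    (h : ckey a = ckey b) : a = b := by
  have la := alnum_toNat_lt a ha
  have lb := alnum_toNat_lt b hb
  have ta := typeOf_bounds a
  have tb := typeOf_bounds b
  have : a.toNat = b.toNat := by unfold ckey at h; omega
  have := congrArg Char.ofNat this
  rwa [Char.ofNat_toNat, Char.ofNat_toNat] at this

lemma cle_of_not_lt {a b : Char} (ha : isAlnumChar a = true) (hb : isAlnumChar b = true)
    (h : ¬ ckey a < ckey b) : cle b a := by
  rcases lt_or_eq_of_le (le_of_not_gt h) with h' | h'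
  · exact Or.inl h'
  · exact Or.inr (ckey_inj hb ha h')

lemma isHigher_alnum (a b : Char) (ha : isAlnumChar a = true) (hb : isAlnumChar b = true) :
    isHigher a b = some (decide (ckey a < ckey b)) := by
  have la := alnum_toNat_lt a ha
  have lb := alnum_toNat_lt b hb
  have ta := typeOf_bounds a
  have tb := typeOf_bounds b
  simp only [isHigher, (alnum_facts a ha).2, (alnum_facts b hb).2]
  by_cases h : typeOf a = typeOf b
  · rw [if_neg (fun hne => hne h)]
    congr 1
    simp only [decide_eq_decide]
    unfold ckey
    omega
  · rw [if_pos h]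
    congr 1
    simp only [decide_eq_decide]
    unfold ckey
    omega

-- merge correctness: result independent of acc, a sorted permutation of s1 ++ s2
lemma mergeSubstrings_spec :
    ∀ (s1 s2 : List Char),
      (∀ c ∈ s1, isAlnumChar c = true) → (∀ c ∈ s2, isAlnumChar c = true) →
      List.Pairwise cle s1 → List.Pairwise cle s2 →
      ∃ m, (∀ acc, mergeSubstrings acc s1 s2 = some (acc ++ m)) ∧
        m.Perm (s1 ++ s2) ∧ List.Pairwise cle m := by
  intro s1
  induction s1 with
  | nil =>
      intro s2 _ _ _ hp2
      exact ⟨s2, fun acc => by rw [mergeSubstrings.eq_def]; simp, by simp, hp2⟩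
  | cons a t1 ih1 =>
      intro s2
      induction s2 with
      | nil =>
          intro h1 _ hp1 _
          exact ⟨a :: t1, fun acc => by rw [mergeSubstrings.eq_def]; simp, by simp, hp1⟩
      | cons b t2 ih2 =>
          intro h1 h2 hp1 hp2
          obtain ⟨hp1h, hp1t⟩ := List.pairwise_cons.mp hp1
          obtain ⟨hp2h, hp2t⟩ := List.pairwise_cons.mp hp2
          have ha : isAlnumChar a = true := h1 a (by simp)
          have hb : isAlnumChar b = true := h2 b (by simp)
          by_cases hlt : ckey a < ckey b
          · obtain ⟨m, hm, hperm, hsort⟩ :=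
              ih1 (b :: t2) (fun c hc => h1 c (by simp [hc])) h2 hp1t hp2
            refine ⟨a :: m, fun acc => ?_, ?_, ?_⟩
            · rw [mergeSubstrings.eq_def]
              simp only [isHigher_alnum a b ha hb, hlt, decide_true, hm (acc ++ [a])]
              simp
            · exact hperm.cons a
            · refine hsort.cons ?_
              intro x hx
              have hx' : x ∈ t1 ++ b :: t2 := hperm.mem_iff.mp hx
              rcases List.mem_append.mp hx' with hx1 | hx2
              · exact hp1h x hx1
              · rcases List.mem_cons.mp hx2 with rfl | hx3
                · exact Or.inl hlt
                · exact cle_trans (Or.inl hlt) (hp2h x hx3)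
          · obtain ⟨m, hm, hperm, hsort⟩ :=
              ih2 h1 (fun c hc => h2 c (by simp [hc])) hp1 hp2t
            refine ⟨b :: m, fun acc => ?_, ?_, ?_⟩
            · rw [mergeSubstrings.eq_def]
              simp only [isHigher_alnum a b ha hb, hlt, decide_false, hm (acc ++ [b])]
              simp
            · exact (hperm.cons b).trans
                (List.perm_middle (a := b) (l₁ := a :: t1) (l₂ := t2)).symm
            · refine hsort.cons ?_
              intro x hx
              have hx' : x ∈ (a :: t1) ++ t2 := hperm.mem_iff.mp hx
              have hba : cle b a := cle_of_not_lt ha hb hlt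
              rcases List.mem_append.mp hx' with hx1 | hx2
              · rcases List.mem_cons.mp hx1 with rfl | hx3
                · exact hba
                · exact cle_trans hba (hp1h x hx3)
              · exact hp2h x hx2

-- A computes a sorted permutation of its input
lemma ginortsAux_spec_fuel :
    ∀ (n : Nat) (l : List Char), l.length ≤ n → (∀ c ∈ l, isAlnumChar c = true) →
      ∃ m, ginortsAux l = some m ∧ m.Perm l ∧ List.Pairwise cle m := by
  intro n
  induction n with
  | zero =>
      intro l hl _
      have : l = [] := List.eq_nil_of_length_eq_zero (Nat.le_zero.mp hl)
      subst this
      exact ⟨[], by rw [ginortsAux]; simp, by simp, by simp⟩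
  | succ n ih =>
      intro l hl halnum
      by_cases hlen : l.length < 2
      · refine ⟨l, by rw [ginortsAux]; simp [hlen], List.Perm.refl l, ?_⟩
        match l, hlen with
        | [], _ => simp
        | [c], _ => simp
      · -- the flip computation succeeds on alnum input
        have hflip : (if l.length = 2 then
            match PySem.List.pyGet? l 0, PySem.List.pyGet? l 1 with
            | some c0, some c1 => isHigher c0 c1
            | _, _ => none
          else some true) ≠ none := by
          split_ifs with h2
          · match l, h2 with
            | [c0, c1], _ =>
                have h0 : isAlnumChar c0 = true := halnum c0 (by simp)
                have h1 : isAlnumChar c1 = true := halnum c1 (by simp)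
                have hg0 : PySem.List.pyGet? ([c0, c1] : List Char) 0 = some c0 := rfl
                have hg1 : PySem.List.pyGet? ([c0, c1] : List Char) 1 = some c1 := rfl
                rw [hg0, hg1]
                show isHigher c0 c1 ≠ none
                rw [isHigher_alnum c0 c1 h0 h1]
                simp
          · simp
        have htk : (l.take (l.length / 2)).length ≤ n := by
          simp [List.length_take]; omega
        have hdp : (l.drop (l.length / 2)).length ≤ n := by
          simp [List.length_drop]; omega
        obtain ⟨m1, he1, hp1, hs1⟩ := ih (l.take (l.length / 2)) htk
          (fun c hc => halnum c (List.mem_of_mem_take hc))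
        obtain ⟨m2, he2, hp2, hs2⟩ := ih (l.drop (l.length / 2)) hdp
          (fun c hc => halnum c (List.mem_of_mem_drop hc))
        have halnum1 : ∀ c ∈ m1, isAlnumChar c = true :=
          fun c hc => halnum c (List.mem_of_mem_take (hp1.mem_iff.mp hc))
        have halnum2 : ∀ c ∈ m2, isAlnumChar c = true :=
          fun c hc => halnum c (List.mem_of_mem_drop (hp2.mem_iff.mp hc))
        obtain ⟨m, hm, hperm, hsort⟩ := mergeSubstrings_spec m1 m2 halnum1 halnum2 hs1 hs2
        refine ⟨m, ?_, ?_, hsort⟩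
        · rw [ginortsAux]
          simp only [hlen, if_false]
          obtain ⟨fb, hfb⟩ := Option.ne_none_iff_exists'.mp hflip
          rw [hfb]
          simp only []
          rw [he1, he2]
          show mergeSubstrings [] m1 m2 = some m
          rw [hm []]
          simp
        · have h := hperm.trans (hp1.append hp2)
          rwa [List.take_append_drop] at h

lemma ginortsAux_spec (l : List Char) (halnum : ∀ c ∈ l, isAlnumChar c = true) :
    ∃ m, ginortsAux l = some m ∧ m.Perm l ∧ List.Pairwise cle m :=
  ginortsAux_spec_fuel l.length l (le_refl _) halnum

-- B-side: count of each character in the emitted list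
lemma count_flatMap_replicate (f : Char → Nat) (c : Char) :
    ∀ (ds : List Char), ds.Nodup →
      (ds.flatMap fun d => List.replicate (f d) d).count c = if c ∈ ds then f c else 0 := by
  intro ds
  induction ds with
  | nil => simp
  | cons d ds ih =>
      intro hnd
      obtain ⟨hd, hnd'⟩ := List.nodup_cons.mp hnd
      simp only [List.flatMap_cons, List.count_append, ih hnd', List.count_replicate]
      by_cases hc : c = d
      · subst hc
        simp [hd]
      · simp [hc, Ne.symm hc]

-- B-side: the emitted list is sorted
lemma pairwise_flatMap_replicate (f : Char → Nat) :
    ∀ (ds : List Char), List.Pairwise (fun a b => ckey a < ckey b) ds →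
      List.Pairwise cle (ds.flatMap fun d => List.replicate (f d) d) := by
  intro ds
  induction ds with
  | nil => simp
  | cons d ds ih =>
      intro hp
      obtain ⟨hph, hpt⟩ := List.pairwise_cons.mp hp
      simp only [List.flatMap_cons]
      rw [List.pairwise_append]
      refine ⟨?_, ih hpt, ?_⟩
      · exact List.pairwise_replicate.mpr (Or.inr (Or.inr rfl))
      · intro x hx y hy
        have hxd : x = d := List.eq_of_mem_replicate hx
        obtain ⟨e, he, hye⟩ := List.mem_flatMap.mp hy
        have hyd : y = e := List.eq_of_mem_replicate hye
        subst hxd; subst hyd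
        exact Or.inl (hph y he)

set_option maxHeartbeats 1000000 in
lemma pyOrderChars_nodup : pyOrderChars.Nodup := by decide

set_option maxHeartbeats 1000000 in
lemma pyOrderChars_sorted : List.Pairwise (fun a b => ckey a < ckey b) pyOrderChars := by
  decide

-- every character of the input is one of the 62 and so counted into the emit pass
lemma bout_count (l : List Char) (halnum : ∀ c ∈ l, isAlnumChar c = true) (c : Char) :
    (pyOrderChars.flatMap fun d => List.replicate (l.count d) d).count c = l.count c := by
  rw [count_flatMap_replicate (fun d => l.count d) c pyOrderChars pyOrderChars_nodup]
  by_cases hm : c ∈ pyOrderChars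
  · simp [hm]
  · simp only [hm, if_false]
    symm
    rw [List.count_eq_zero]
    intro hc
    exact hm ((alnum_facts c (halnum c hc)).1)

-- ===== VERDICT =====
theorem ginorts_spec : Claim_equal_ginorts := by
  unfold Claim_equal_ginorts Spec_ginorts Pre_ginorts
  intro s _ hpre
  by_cases hlen : s.toList.length < 2
  · -- both sides return the input unchanged
    unfold ginorts
    rw [ginortsAux]
    simp only [hlen, if_true]
    unfold ginorts_alt
    simp only [hlen, if_true]
    exact String.toList_inj.mp (by rw [String.toList_ofList])
  · have halnum : ∀ c ∈ s.toList, isAlnumChar c = true := by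
      rcases hpre with h | h
      · exact absurd h hlen
      · exact fun c hc => List.all_eq_true.mp h c hc
    obtain ⟨m, he, hperm, hsort⟩ := ginortsAux_spec s.toList halnum
    unfold ginorts
    rw [he]
    unfold ginorts_alt
    simp only [hlen, if_false]
    congr 1
    have hcnt : ∀ c : Char,
        ((s.toList.foldl (fun d c => d.insert c (d.getD c 0 + 1))
          (PySem.Dict.empty : PySem.Dict Char Int)).getD c 0).toNat = s.toList.count c := by
      intro c
      rw [PySem.Dict.getD_foldl_insert_add_one]
      simp [PySem.Dict.getD_empty]
    simp only [hcnt]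
    have hsortB : List.Pairwise cle
        (pyOrderChars.flatMap fun d => List.replicate (s.toList.count d) d) :=
      pairwise_flatMap_replicate (fun d => s.toList.count d) pyOrderChars pyOrderChars_sorted
    have hpermB : (pyOrderChars.flatMap fun d => List.replicate (s.toList.count d) d).Perm
        s.toList :=
      List.perm_iff_count.mpr (fun c => bout_count s.toList halnum c)
    exact (hperm.trans hpermB.symm).eq_of_pairwise
      (fun a b _ _ h1 h2 => cle_antisymm h1 h2) hsort hsortB
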